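-- pv_equiv track=rewrite | github.com/thomasmichaelkane/aoc24 | day_two.py | check_dampened_safety
-- ===== SOURCE A (Python) =====
-- def check_safety(report):
--
--     max_difference = 3
--
--     if all((d > 0) & (abs(d) <= max_difference) for d in report):
--         # descending and safe
--         return True
--
--     elif all((d < 0) & (abs(d) <= max_difference) for d in report):
--         # ascending and safe
--         return True
--
--     else:
--         # unsafe
--         return False
--
-- def check_dampened_safety(report):
--
--     for i in range(len(report)):
--
--         dampened_report = report.copy()
--         dampened_report.pop(i)
--         dampened_diff = [dampened_report[i] - dampened_report[i+1] for i in range(len(dampened_report) - 1)]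
--
--         if check_safety(dampened_diff):
--             return True
--
--     return False
-- ===== SOURCE B (Python) =====
-- def check_dampened_safety(report):
--     # One linear pass per direction over precomputed prefix/suffix "good run" flags,
--     # instead of rebuilding and rechecking the whole report for every removal index.
--     def exists_removal(sign):
--         def good(d):
--             return 1 <= sign * d <= 3
--         diffs = [a - b for a, b in zip(report, report[1:])]
--         m = len(diffs)
--         pre = [True]                      # pre[i] : diffs[:i] all good
--         for d in diffs:
--             pre.append(pre[-1] and good(d))
--         suf = [True]                      # suf[i] : diffs[i:] all good
--         for d in reversed(diffs):
--             suf.append(suf[-1] and good(d))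
--         suf.reverse()
--         n = len(report)
--         for i in range(n):
--             if i == 0:
--                 ok = suf[1] if m > 0 else True
--             elif i == n - 1:
--                 ok = pre[m - 1]
--             else:
--                 ok = pre[i - 1] and good(report[i - 1] - report[i + 1]) and suf[i + 1]
--             if ok:
--                 return True
--         return False
--     return exists_removal(1) or exists_removal(-1)
-- ===== Notes on version B (the rewrite author's own statement) =====
-- stated objective: faster
-- what changed: B computes the difference list once and precomputes prefix/suffix all-good run flags per direction, deciding each single-removal candidate in O(1) instead of copying the list and rechecking it for every removal index.
import Mathlib
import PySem

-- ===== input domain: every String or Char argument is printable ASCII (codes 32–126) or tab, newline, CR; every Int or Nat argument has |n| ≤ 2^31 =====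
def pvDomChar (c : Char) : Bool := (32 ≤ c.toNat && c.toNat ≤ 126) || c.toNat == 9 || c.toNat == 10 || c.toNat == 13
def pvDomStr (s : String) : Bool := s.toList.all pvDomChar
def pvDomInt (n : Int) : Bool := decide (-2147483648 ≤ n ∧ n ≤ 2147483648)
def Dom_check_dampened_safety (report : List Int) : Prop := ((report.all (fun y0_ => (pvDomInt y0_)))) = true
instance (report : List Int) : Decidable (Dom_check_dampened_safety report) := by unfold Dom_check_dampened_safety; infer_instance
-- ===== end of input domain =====

-- B replaces A's per-index list copy + full recheck by one pass with precomputed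
-- prefix/suffix "good run" flags (objective: faster, O(n) vs O(n^2)).


-- ===== PORT A =====
-- helper: all diffs positive and |d|<=3, or all negative and |d|<=3
def check_safety (report : List Int) : Bool :=
  if report.all (fun d => decide (d > 0) && decide (|d| ≤ 3)) then true
  else if report.all (fun d => decide (d < 0) && decide (|d| ≤ 3)) then true
  else false

-- for i in range(len(report)): copy, pop(i), build diff list by index comprehension, test; else False
def check_dampened_safety (report : List Int) : Bool :=
  (PySem.List.pyRange 0 (PySem.List.len report) 1).any (fun i =>
    let dampened := ((PySem.List.pop? report i).map Prod.snd).getD []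
    let dampened_diff := (PySem.List.pyRange 0 (PySem.List.len dampened - 1) 1).map
      (fun j => PySem.List.pyGetD dampened j 0 - PySem.List.pyGetD dampened (j + 1) 0)
    check_safety dampened_diff)

-- ===== PORT B =====
def goodB (sign d : Int) : Bool := decide (1 ≤ sign * d ∧ sign * d ≤ 3)

-- mirrors B's accumulation: out = [True]; for d in xs: out.append(out[-1] and good(d))
def outsB (sign : Int) (a : Bool) : List Int → List Bool
  | [] => [a]
  | d :: t => a :: outsB sign (a && goodB sign d) t

def exists_removal (report : List Int) (sign : Int) : Bool :=
  let diffs := ((report.zip (PySem.List.slice report (some 1) none)).map (fun p => p.1 - p.2))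
  let m := PySem.List.len diffs
  let pre := outsB sign true diffs
  let suf := (outsB sign true diffs.reverse).reverse
  let n := PySem.List.len report
  (PySem.List.pyRange 0 n 1).any (fun i =>
    if i = 0 then (if 0 < m then PySem.List.pyGetD suf 1 true else true)
    else if i = n - 1 then PySem.List.pyGetD pre (m - 1) true
    else PySem.List.pyGetD pre (i - 1) true
      && goodB sign (PySem.List.pyGetD report (i - 1) 0 - PySem.List.pyGetD report (i + 1) 0)
      && PySem.List.pyGetD suf (i + 1) true)

def check_dampened_safety_alt (report : List Int) : Bool :=
  exists_removal report 1 || exists_removal report (-1)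

-- ===== PRECONDITION & SPEC =====
def Spec_check_dampened_safety (report : List Int) (out : Bool) : Prop := out = check_dampened_safety_alt report
instance (report : List Int) (out : Bool) : Decidable (Spec_check_dampened_safety report out) := by unfold Spec_check_dampened_safety; infer_instance

-- ===== CLAIM (what is proved, stated in full; the proofs are below) =====
def Claim_equal_check_dampened_safety : Prop := ∀ (report : List Int), Dom_check_dampened_safety report → Spec_check_dampened_safety report (check_dampened_safety report)

-- ===== LEMMAS AND PROOFS =====

-- common reference: the consecutive-difference list, "all diffs good in direction s",
-- and "some single removal is safe"
def chainDiffs : List Int → List Int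
  | [] => []
  | [_] => []
  | a :: b :: t => (a - b) :: chainDiffs (b :: t)

def chainOK (s : Int) (l : List Int) : Bool := (chainDiffs l).all (goodB s)

def refSafe (report : List Int) : Bool :=
  (List.range report.length).any (fun k =>
    chainOK 1 (report.eraseIdx k) || chainOK (-1) (report.eraseIdx k))

theorem length_chainDiffs (l : List Int) : (chainDiffs l).length = l.length - 1 := by
  induction l with
  | nil => rfl
  | cons a t ih =>
    cases t with
    | nil => rfl
    | cons b t' => simpa [chainDiffs] using ih

-- ===== A-side lemmas =====

theorem diffs_getD (xs : List Int) :
    (List.range (xs.length - 1)).map (fun j => xs.getD j 0 - xs.getD (j + 1) 0) = chainDiffs xs := by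
  induction xs with
  | nil => simp [chainDiffs]
  | cons a t ih =>
    cases t with
    | nil => simp [chainDiffs]
    | cons b t' =>
      have h : (a :: b :: t').length - 1 = (t'.length + 1) := by simp
      rw [h, List.range_succ_eq_map, chainDiffs]
      simp only [List.map_cons, List.map_map]
      refine congrArg₂ List.cons (by simp) ?_
      rw [← ih]
      refine List.map_congr_left (fun k hk => ?_)
      simp [Function.comp]

theorem diffs_pyGetD (xs : List Int) :
    (PySem.List.pyRange 0 (PySem.List.len xs - 1) 1).map
      (fun j => PySem.List.pyGetD xs j 0 - PySem.List.pyGetD xs (j + 1) 0) = chainDiffs xs := by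
  rw [PySem.List.pyRange_one, List.map_map, ← diffs_getD]
  have hn : ((PySem.List.len xs - 1 - 0)).toNat = xs.length - 1 := by
    simp [PySem.List.len_eq]
  rw [hn]
  refine List.map_congr_left (fun k hk => ?_)
  have h1 : ((0:Int) + ↑k) = ((k : Nat) : Int) := by ring
  have h2 : (((k : Nat) : Int) + 1) = (((k + 1) : Nat) : Int) := by push_cast; ring
  simp only [Function.comp, h1, h2, PySem.List.pyGetD_natCast]

theorem goodA1 (d : Int) : (decide (d > 0) && decide (|d| ≤ 3)) = goodB 1 d := by
  simp only [goodB, ← Bool.decide_and, one_mul]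
  rw [decide_eq_decide, abs_le]
  omega

theorem goodA2 (d : Int) : (decide (d < 0) && decide (|d| ≤ 3)) = goodB (-1) d := by
  simp only [goodB, ← Bool.decide_and, neg_mul, one_mul]
  rw [decide_eq_decide, abs_le]
  omega

theorem check_safety_eq (l : List Int) :
    check_safety l = (l.all (goodB 1) || l.all (goodB (-1))) := by
  unfold check_safety
  simp only [goodA1, goodA2]
  split_ifs with h1 h2 <;> simp_all

theorem a_eq_ref (report : List Int) : check_dampened_safety report = refSafe report := by
  unfold check_dampened_safety refSafe
  rw [PySem.List.pyRange_one]
  have hn : ((PySem.List.len report - 0)).toNat = report.length := by simp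
  rw [hn, List.any_map]
  refine PySem.List.any_congr_mem (fun k hk => ?_)
  rw [List.mem_range] at hk
  simp only [Function.comp_apply, zero_add, PySem.List.pop?_natCast report k hk,
    Option.map_some, Option.getD_some]
  rw [diffs_pyGetD, check_safety_eq]
  rfl

-- ===== B-side lemmas =====

theorem zip_diffs (l : List Int) :
    ((l.zip l.tail).map (fun p => p.1 - p.2)) = chainDiffs l := by
  induction l with
  | nil => rfl
  | cons a t ih =>
    cases t with
    | nil => rfl
    | cons b t' => simpa [chainDiffs] using ih

theorem outsB_spec (s : Int) (xs : List Int) (a : Bool) :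
    outsB s a xs = (List.range (xs.length + 1)).map (fun i => a && (xs.take i).all (goodB s)) := by
  induction xs generalizing a with
  | nil => simp [outsB]
  | cons d t ih =>
    conv_rhs => rw [show (d :: t).length + 1 = (t.length + 1) + 1 from rfl, List.range_succ_eq_map]
    rw [outsB, ih]
    simp only [List.map_cons, List.map_map]
    refine congrArg₂ List.cons (by simp) (List.map_congr_left (fun k hk => ?_))
    simp only [Function.comp_apply, List.take_succ_cons, List.all_cons, Bool.and_assoc]

theorem pre_getD (s : Int) (xs : List Int) (i : Nat) (h : i ≤ xs.length) :
    (outsB s true xs).getD i true = (xs.take i).all (goodB s) := by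
  rw [outsB_spec, PySem.List.getD_map_range _ _ _ _ (by omega)]
  simp

theorem getD_rev {α : Type} (l : List α) (i : Nat) (d : α) (h : i < l.length) :
    l.reverse.getD i d = l.getD (l.length - 1 - i) d := by
  rw [List.getD_eq_getElem _ _ (by simpa using h), List.getElem_reverse,
    List.getD_eq_getElem _ _ (by omega)]

theorem length_outsB (s : Int) (a : Bool) (xs : List Int) :
    (outsB s a xs).length = xs.length + 1 := by
  rw [outsB_spec]; simp

theorem suf_getD (s : Int) (xs : List Int) (i : Nat) (h : i ≤ xs.length) :
    ((outsB s true xs.reverse).reverse).getD i true = (xs.drop i).all (goodB s) := by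
  rw [getD_rev _ _ _ (by rw [length_outsB]; simp; omega), length_outsB]
  have h2 : xs.reverse.length + 1 - 1 - i = xs.length - i := by simp
  rw [h2, outsB_spec, PySem.List.getD_map_range _ _ _ _ (by simp)]
  rw [List.take_reverse]
  have h3 : xs.length - (xs.length - i) = i := by omega
  simp [h3]

theorem chainDiffs_erase_zero (l : List Int) :
    chainDiffs (l.eraseIdx 0) = (chainDiffs l).drop 1 := by
  cases l with
  | nil => rfl
  | cons a t =>
    cases t with
    | nil => rfl
    | cons b t' => simp [chainDiffs]

theorem chainDiffs_dropLast (l : List Int) :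
    chainDiffs l.dropLast = (chainDiffs l).dropLast := by
  induction l with
  | nil => rfl
  | cons a t ih =>
    cases t with
    | nil => rfl
    | cons b t' =>
      cases t' with
      | nil => simp [chainDiffs]
      | cons c t'' =>
        have h2 : (b :: c :: t'').dropLast = b :: (c :: t'').dropLast := by simp
        have hL : chainDiffs ((a :: b :: c :: t'').dropLast)
            = (a - b) :: chainDiffs ((b :: c :: t'').dropLast) := by
          rw [show (a :: b :: c :: t'').dropLast = a :: (b :: c :: t'').dropLast by simp, h2]
          rfl
        rw [hL, ih, show chainDiffs (a :: b :: c :: t'') = (a - b) :: chainDiffs (b :: c :: t'') from rfl,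
          List.dropLast_cons_of_ne_nil (by simp [chainDiffs])]

theorem chainDiffs_erase_mid : ∀ (k : Nat) (l : List Int), k + 2 < l.length →
    chainDiffs (l.eraseIdx (k + 1)) =
      (chainDiffs l).take k ++ (l.getD k 0 - l.getD (k + 2) 0) :: (chainDiffs l).drop (k + 2) := by
  intro k
  induction k with
  | zero =>
    intro l hl
    match l, hl with
    | a :: b :: c :: t, _ => simp [chainDiffs]
  | succ k ih =>
    intro l hl
    match l, hl with
    | a :: b :: t, hl =>
      have hbt : k + 2 < (b :: t).length := by simp at hl ⊢; omega
      have h1 : (a :: b :: t).eraseIdx (k + 1 + 1) = a :: ((b :: t).eraseIdx (k + 1)) := rfl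
      rw [h1]
      have h2 : (b :: t).eraseIdx (k + 1) = b :: (t.eraseIdx k) := rfl
      have h3 : chainDiffs (a :: b :: t.eraseIdx k) = (a - b) :: chainDiffs (b :: t.eraseIdx k) := by
        cases t <;> cases k <;> rfl
      rw [h2, h3, ← h2, ih _ hbt]
      have h4 : chainDiffs (a :: b :: t) = (a - b) :: chainDiffs (b :: t) := rfl
      rw [h4]
      simp

theorem exists_removal_eq (report : List Int) (s : Int) :
    exists_removal report s = (List.range report.length).any (fun k => chainOK s (report.eraseIdx k)) := by
  unfold exists_removal
  simp only [PySem.List.slice_from_one, zip_diffs, PySem.List.len_eq]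
  rw [PySem.List.pyRange_one]
  have hn : (((report.length : Int) - 0)).toNat = report.length := by simp
  rw [hn, List.any_map]
  refine PySem.List.any_congr_mem (fun k hk => ?_)
  rw [List.mem_range] at hk
  simp only [Function.comp_apply, zero_add]
  by_cases hk0 : k = 0
  · subst hk0
    rw [if_pos (by simp)]
    rw [chainOK, chainDiffs_erase_zero]
    by_cases hm : 0 < (chainDiffs report).length
    · rw [if_pos (by exact_mod_cast hm)]
      have h1 : ((1:Int)) = ((1:Nat):Int) := by norm_num
      rw [h1, PySem.List.pyGetD_natCast, suf_getD _ _ _ (by omega)]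
    · rw [if_neg (by exact_mod_cast hm)]
      have hnil : chainDiffs report = [] := List.eq_nil_of_length_eq_zero (by omega)
      simp [hnil]
  · rw [if_neg (show ¬((k:Int) = 0) by exact_mod_cast hk0)]
    have hD : (chainDiffs report).length = report.length - 1 := length_chainDiffs report
    by_cases hkl : k = report.length - 1
    · rw [if_pos (by omega)]
      have hc : ((chainDiffs report).length - 1 : Int) = (((chainDiffs report).length - 1 : Nat) : Int) := by
        omega
      rw [hc, PySem.List.pyGetD_natCast, pre_getD _ _ _ (by omega), chainOK, hkl,
        List.eraseIdx_length_sub_one, chainDiffs_dropLast, List.dropLast_eq_take, hD]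
    · rw [if_neg (by omega)]
      have hmid : (k - 1) + 2 < report.length := by omega
      have hkk := chainDiffs_erase_mid (k - 1) report hmid
      rw [show (k - 1) + 1 = k by omega] at hkk
      rw [chainOK, hkk]
      have e1 : ((k:Int) - 1) = (((k - 1 : Nat)) : Int) := by omega
      have e2 : ((k:Int) + 1) = (((k + 1 : Nat)) : Int) := by omega
      rw [e1, e2]
      simp only [PySem.List.pyGetD_natCast]
      rw [pre_getD _ _ _ (by omega), suf_getD _ _ _ (by omega)]
      have e3 : (k - 1) + 2 = k + 1 := by omega
      rw [e3]
      simp [List.all_append, List.all_cons, Bool.and_assoc]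

theorem any_orB {α : Type} (l : List α) (f g : α → Bool) :
    l.any (fun x => f x || g x) = (l.any f || l.any g) := by
  induction l with
  | nil => rfl
  | cons a t ih =>
    simp only [List.any_cons, ih]
    cases f a <;> cases g a <;> cases t.any f <;> cases t.any g <;> rfl

theorem b_eq_ref (report : List Int) : check_dampened_safety_alt report = refSafe report := by
  unfold check_dampened_safety_alt refSafe
  rw [exists_removal_eq, exists_removal_eq, ← any_orB]

-- ===== VERDICT (by name: the statement is the Claim_ definition above) =====
theorem check_dampened_safety_spec : Claim_equal_check_dampened_safety := by
  intro report _
  unfold Spec_check_dampened_safety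
  rw [a_eq_ref, b_eq_ref]
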